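-- pv_equiv track=rewrite | github.com/dei435/proyecto-1 | T5.py | buscar_y_en_x
-- ===== SOURCE A (Python) =====
-- def buscar_y_en_x(x, y):
--     cantidad =0
--     maximo = x [0]
--     for i in range(len(x)):
--         if x [i] ==y:
--             cantidad +=1
--         if x[i] > maximo :
--              maximo = x [i]
--     if y == maximo :
--         es_maximo = True
--     else :
--         es_maximo= False
--     return cantidad, es_maximo
-- ===== SOURCE B (Python) =====
-- def _cm(x, y):
--     # (occurrences of y in x, max of x) for nonempty x, by splitting in half
--     if len(x) == 1:
--         return (1 if x[0] == y else 0), x[0]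
--     mid = len(x) // 2
--     c1, m1 = _cm(x[:mid], y)
--     c2, m2 = _cm(x[mid:], y)
--     return c1 + c2, (m1 if m1 >= m2 else m2)
--
-- def buscar_y_en_x(x, y):
--     cantidad, maximo = _cm(x, y)
--     return cantidad, y == maximo
-- ===== Notes on version B (the rewrite author's own statement) =====
-- stated objective: alternative
-- what changed: Replaces A's single left-to-right index loop threading (count, running max) with a divide-and-conquer recursion that splits the list in half, solves each half, and merges (c1+c2, max(m1,m2)); Pre_ excludes the empty list, on which both A (IndexError) and B (RecursionError) raise.
import Mathlib
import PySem

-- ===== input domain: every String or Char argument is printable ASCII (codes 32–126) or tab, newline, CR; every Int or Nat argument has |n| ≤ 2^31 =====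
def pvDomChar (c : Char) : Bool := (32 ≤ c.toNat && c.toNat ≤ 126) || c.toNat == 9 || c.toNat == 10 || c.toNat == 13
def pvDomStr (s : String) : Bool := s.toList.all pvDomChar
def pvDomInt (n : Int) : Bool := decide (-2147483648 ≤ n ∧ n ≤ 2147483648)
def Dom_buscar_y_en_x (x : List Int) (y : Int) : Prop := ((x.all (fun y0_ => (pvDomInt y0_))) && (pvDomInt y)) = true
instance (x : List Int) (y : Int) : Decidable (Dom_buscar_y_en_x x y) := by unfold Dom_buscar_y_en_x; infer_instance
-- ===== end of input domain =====

-- B replaces A's single left-to-right index loop threading (count, running max) with a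
-- divide-and-conquer recursion: split in half, solve each half, merge (c1+c2, max(m1,m2)).
-- ===== PORT A =====
def buscar_y_en_x (x : List Int) (y : Int) : Int × Bool :=
  let cantidad : Int := 0
  let maximo : Int := PySem.List.pyGetD x 0 0
  let s := (PySem.List.pyRange 0 (x.length : Int) 1).foldl
    (fun (st : Int × Int) i =>
      let st1 := if PySem.List.pyGetD x i 0 == y then (st.1 + 1, st.2) else st
      if PySem.List.pyGetD x i 0 > st1.2 then (st1.1, PySem.List.pyGetD x i 0) else st1)
    (cantidad, maximo)
  let es_maximo := if y == s.2 then true else false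
  (s.1, es_maximo)

-- ===== PORT B =====
-- _cm: x[:mid]/x[mid:] with mid = len(x)//2 (0 ≤ mid ≤ len) are exactly take/drop
-- (PySem.List.slice_to_natCast / slice_from_natCast), and len(x)//2 on a Nat is Nat division.
-- On [] the Python _cm raises RecursionError (excluded by Pre_); the port returns (0, 0) there
-- purely as a totality guard.
def cm (x : List Int) (y : Int) : Int × Int :=
  if x.length = 1 then
    (if PySem.List.pyGetD x 0 0 == y then 1 else 0, PySem.List.pyGetD x 0 0)
  else if x.length = 0 then (0, 0)
  else
    let mid : Nat := x.length / 2
    let p1 := cm (x.take mid) y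
    let p2 := cm (x.drop mid) y
    (p1.1 + p2.1, if p1.2 ≥ p2.2 then p1.2 else p2.2)
termination_by x.length
decreasing_by
  · simp [List.length_take]; omega
  · simp [List.length_drop]; omega

def buscar_y_en_x_alt (x : List Int) (y : Int) : Int × Bool :=
  let p := cm x y
  (p.1, y == p.2)

-- ===== PRECONDITION & SPEC =====
-- Pre_ excludes only the empty list, on which both A (IndexError) and B (RecursionError) raise.
def Pre_buscar_y_en_x (x : List Int) (y : Int) : Prop := x ≠ []
instance (x : List Int) (y : Int) : Decidable (Pre_buscar_y_en_x x y) := by unfold Pre_buscar_y_en_x; infer_instance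
def pvWitness_buscar_y_en_x : List Int × Int := ([1, 2, 2], 2)

def Spec_buscar_y_en_x (x : List Int) (y : Int) (out : Int × Bool) : Prop := out = buscar_y_en_x_alt x y
instance (x : List Int) (y : Int) (out : Int × Bool) : Decidable (Spec_buscar_y_en_x x y out) := by unfold Spec_buscar_y_en_x; infer_instance

-- ===== CLAIM (what is proved, stated in full; the proofs are below) =====
def Claim_equal_buscar_y_en_x : Prop := ∀ (x : List Int) (y : Int), Dom_buscar_y_en_x x y → Pre_buscar_y_en_x x y → Spec_buscar_y_en_x x y (buscar_y_en_x x y)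

-- ===== LEMMAS AND PROOFS =====

-- A's element-level loop body computes (count added to the accumulator, running max).
theorem foldl_count_max (y : Int) (l : List Int) (c m : Int) :
    l.foldl
      (fun (st : Int × Int) v =>
        if v > (if v == y then (st.1 + 1, st.2) else st).2
        then ((if v == y then (st.1 + 1, st.2) else st).1, v)
        else (if v == y then (st.1 + 1, st.2) else st))
      (c, m) = (c + (l.count y : Int), l.foldl max m) := by
  induction l generalizing c m with
  | nil => simp
  | cons a l ih =>
    rw [List.foldl_cons]
    have hstep : (if a > (if a == y then ((c, m).1 + 1, (c, m).2) else (c, m)).2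
        then ((if a == y then ((c, m).1 + 1, (c, m).2) else (c, m)).1, a)
        else (if a == y then ((c, m).1 + 1, (c, m).2) else (c, m)))
        = ((if a = y then c + 1 else c), max m a) := by
      simp only [beq_iff_eq]
      split_ifs <;> simp_all [max_def, Prod.ext_iff] <;> omega
    rw [hstep, ih, List.count_cons, List.foldl_cons]
    have hc : ((if a = y then c + 1 else c) + (l.count y : Int))
        = c + ((List.count y l + if a == y then 1 else 0 : Nat) : Int) := by
      split_ifs <;> simp_all <;> omega
    rw [hc]

-- the running max of a nonempty list, as A's loop maintains it
def mx : List Int → Int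
  | [] => 0
  | a :: t => t.foldl max a

theorem foldl_max_init (s : List Int) (m b : Int) :
    s.foldl max (max m b) = max m (s.foldl max b) := by
  induction s generalizing b with
  | nil => simp
  | cons c s ih => simp [List.foldl_cons, max_assoc, ih]

theorem mx_append (l1 l2 : List Int) (h1 : l1 ≠ []) (h2 : l2 ≠ []) :
    mx (l1 ++ l2) = max (mx l1) (mx l2) := by
  obtain ⟨a, t, rfl⟩ := List.exists_cons_of_ne_nil h1
  obtain ⟨b, s, rfl⟩ := List.exists_cons_of_ne_nil h2
  simp only [mx, List.cons_append, List.foldl_append, List.foldl_cons]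
  rw [foldl_max_init]

-- divide and conquer computes (count, max)
theorem cm_spec (y : Int) : ∀ (x : List Int), x ≠ [] →
    cm x y = ((x.count y : Int), mx x) := by
  intro x
  induction x using cm.induct y with
  | case1 x h1 =>
    intro _
    obtain ⟨a, ha⟩ := List.length_eq_one_iff.mp h1
    subst ha
    by_cases hy : a = y <;> simp [cm, mx, PySem.List.pyGetD, hy]
  | case2 x h1 h0 =>
    intro hne
    exact absurd (List.length_eq_zero_iff.mp h0) hne
  | case3 x h1 h0 mid ih1 ih2 =>
    intro _
    have hlen : 2 ≤ x.length := by omega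
    have htk : x.take (x.length / 2) ≠ [] := by
      rw [← List.length_pos_iff, List.length_take]; omega
    have hdr : x.drop (x.length / 2) ≠ [] := by
      rw [← List.length_pos_iff, List.length_drop]; omega
    rw [cm]
    simp only [h1, h0, if_false]
    rw [ih1 htk, ih2 hdr]
    have hx : x.take (x.length / 2) ++ x.drop (x.length / 2) = x := List.take_append_drop _ _
    simp only [Prod.mk.injEq, mid]
    refine ⟨?_, ?_⟩
    · rw [← hx, List.count_append]; push_cast; rw [hx]
    · rw [← hx, mx_append _ _ htk hdr, hx]
      simp [max_def]
      split_ifs <;> omega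

-- ===== VERDICT (by name: the statement is the Claim_ definition above) =====
theorem buscar_y_en_x_spec : Claim_equal_buscar_y_en_x := by
  intro x y _ hpre
  obtain ⟨a, t, rfl⟩ := List.exists_cons_of_ne_nil hpre
  unfold Spec_buscar_y_en_x
  simp only [buscar_y_en_x, buscar_y_en_x_alt, PySem.List.pyGetD_zero_cons]
  rw [show ((a :: t).length : Int) = PySem.List.len (a :: t) from rfl,
      PySem.List.foldl_pyRange_zero_pyGetD (a :: t) 0
        (fun (st : Int × Int) v =>
          if v > (if v == y then (st.1 + 1, st.2) else st).2
          then ((if v == y then (st.1 + 1, st.2) else st).1, v)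
          else (if v == y then (st.1 + 1, st.2) else st)) ((0 : Int), a),
      foldl_count_max, cm_spec y (a :: t) (by simp)]
  simp [mx]
  exact Eq.symm (Bool.beq_eq_decide_eq y (List.foldl max a t))
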